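-- pv_equiv track=rewrite | github.com/francescolampertico-us/ai-app-pa | app/pages/3_Disclosure_Tracker.py | _extract_matched_names
-- ===== SOURCE A (Python) =====
-- def _extract_matched_names(csv_data: dict) -> tuple[list[str], list[str]]:
--     """Extract unique client and registrant names separately from CSV data."""
--     clients = set()
--     registrants = set()
--     for r in csv_data.get("lda_filings", []):
--         registrants.add(r.get("registrant_name", ""))
--         clients.add(r.get("client_name", ""))
--     for r in csv_data.get("lda_issues", []):
--         registrants.add(r.get("registrant", ""))
--         clients.add(r.get("client", ""))
--     for r in csv_data.get("lda_lobbyists", []):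
--         registrants.add(r.get("registrant", ""))
--         clients.add(r.get("client", ""))
--     # FARA
--     for r in csv_data.get("fara_foreign_principals", []):
--         registrants.add(r.get("registrant_name", ""))
--         clients.add(r.get("foreign_principal_name", ""))
--     clients.discard("")
--     registrants.discard("")
--     return sorted(clients), sorted(registrants)
-- ===== SOURCE B (Python) =====
-- def _extract_matched_names(csv_data: dict) -> tuple[list[str], list[str]]:
--     """Extract unique client and registrant names separately from CSV data."""
--     fields = [
--         ("lda_filings", "registrant_name", "client_name"),
--         ("lda_issues", "registrant", "client"),
--         ("lda_lobbyists", "registrant", "client"),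
--         ("fara_foreign_principals", "registrant_name", "foreign_principal_name"),
--     ]
--     # Gather ALL occurrences (duplicates included), sort the multiset, then
--     # uniquify by one adjacency scan that also drops the empty string.
--     regs = sorted(r.get(rk, "") for key, rk, _ck in fields
--                   for r in csv_data.get(key, []))
--     clis = sorted(r.get(ck, "") for key, _rk, ck in fields
--                   for r in csv_data.get(key, []))
--
--     def squeeze(names):
--         out = []
--         for name in names:
--             if name and (not out or out[-1] != name):
--                 out.append(name)
--         return out
--
--     return squeeze(clis), squeeze(regs)
-- ===== Notes on version B (the rewrite author's own statement) =====
-- stated objective: alternative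
-- what changed: Instead of A's two hash sets filled by four loops and then sorted, B collects all name occurrences (duplicates kept) into plain lists, sorts them, and removes duplicates and the empty string in a single adjacency scan over each sorted list.
import Mathlib
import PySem

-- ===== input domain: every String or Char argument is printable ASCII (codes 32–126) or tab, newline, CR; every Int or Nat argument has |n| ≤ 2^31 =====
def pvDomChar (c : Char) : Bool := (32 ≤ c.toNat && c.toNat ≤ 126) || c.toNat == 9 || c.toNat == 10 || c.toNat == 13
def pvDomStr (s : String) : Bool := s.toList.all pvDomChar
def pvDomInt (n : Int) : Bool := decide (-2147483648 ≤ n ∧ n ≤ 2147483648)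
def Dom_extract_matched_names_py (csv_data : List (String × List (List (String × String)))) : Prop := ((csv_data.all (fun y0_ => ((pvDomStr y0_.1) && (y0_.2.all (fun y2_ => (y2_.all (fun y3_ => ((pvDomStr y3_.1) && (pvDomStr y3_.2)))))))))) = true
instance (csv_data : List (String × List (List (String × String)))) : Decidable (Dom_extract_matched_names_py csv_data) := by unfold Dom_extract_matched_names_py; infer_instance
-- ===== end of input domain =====

-- B drops A's hash sets entirely: it sorts the raw multiset of occurrences and removes
-- duplicates and "" in one adjacency scan (objective: alternative, same asymptotic cost).

-- ===== PORT A =====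
def extract_matched_names_py (csv_data : List (String × List (List (String × String)))) : List String × List String :=
  -- state = (registrants, clients), both Python sets
  let st0 : PySem.Set String × PySem.Set String := (PySem.Set.empty, PySem.Set.empty)
  let st1 := ((PySem.Dict.mk csv_data).getD "lda_filings" []).foldl
    (fun (st : PySem.Set String × PySem.Set String) r =>
      (PySem.Set.add st.1 ((PySem.Dict.mk r).getD "registrant_name" ""),
       PySem.Set.add st.2 ((PySem.Dict.mk r).getD "client_name" ""))) st0
  let st2 := ((PySem.Dict.mk csv_data).getD "lda_issues" []).foldl
    (fun (st : PySem.Set String × PySem.Set String) r =>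
      (PySem.Set.add st.1 ((PySem.Dict.mk r).getD "registrant" ""),
       PySem.Set.add st.2 ((PySem.Dict.mk r).getD "client" ""))) st1
  let st3 := ((PySem.Dict.mk csv_data).getD "lda_lobbyists" []).foldl
    (fun (st : PySem.Set String × PySem.Set String) r =>
      (PySem.Set.add st.1 ((PySem.Dict.mk r).getD "registrant" ""),
       PySem.Set.add st.2 ((PySem.Dict.mk r).getD "client" ""))) st2
  let st4 := ((PySem.Dict.mk csv_data).getD "fara_foreign_principals" []).foldl
    (fun (st : PySem.Set String × PySem.Set String) r =>
      (PySem.Set.add st.1 ((PySem.Dict.mk r).getD "registrant_name" ""),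
       PySem.Set.add st.2 ((PySem.Dict.mk r).getD "foreign_principal_name" ""))) st3
  let clients := PySem.Set.discard st4.2 ""
  let registrants := PySem.Set.discard st4.1 ""
  (PySem.List.sorted clients (fun x => x) false, PySem.List.sorted registrants (fun x => x) false)

-- ===== PORT B =====
-- the field table: (source list key, registrant key, client key)
def emnFields : List (String × String × String) :=
  [("lda_filings", "registrant_name", "client_name"),
   ("lda_issues", "registrant", "client"),
   ("lda_lobbyists", "registrant", "client"),
   ("fara_foreign_principals", "registrant_name", "foreign_principal_name")]

-- 'squeeze': one adjacency scan over a sorted list, dropping "" and adjacent duplicates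
def emnSqueeze (names : List String) : List String :=
  names.foldl
    (fun out name =>
      if name ≠ "" ∧ (out = [] ∨ out.getLast? ≠ some name) then out ++ [name] else out) []

def extract_matched_names_py_alt (csv_data : List (String × List (List (String × String)))) : List String × List String :=
  let d := PySem.Dict.mk csv_data
  let regs := PySem.List.sorted
    (emnFields.flatMap (fun s => (d.getD s.1 []).map (fun r => (PySem.Dict.mk r).getD s.2.1 "")))
    (fun x => x) false
  let clis := PySem.List.sorted
    (emnFields.flatMap (fun s => (d.getD s.1 []).map (fun r => (PySem.Dict.mk r).getD s.2.2 "")))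
    (fun x => x) false
  (emnSqueeze clis, emnSqueeze regs)

-- ===== PRECONDITION & SPEC =====
def Spec_extract_matched_names_py (csv_data : List (String × List (List (String × String)))) (out : List String × List String) : Prop := out = extract_matched_names_py_alt csv_data
instance (csv_data : List (String × List (List (String × String)))) (out : List String × List String) : Decidable (Spec_extract_matched_names_py csv_data out) := by unfold Spec_extract_matched_names_py; infer_instance

-- ===== CLAIM =====
def Claim_equal_extract_matched_names_py : Prop := ∀ (csv_data : List (String × List (List (String × String)))), Dom_extract_matched_names_py csv_data → Spec_extract_matched_names_py csv_data (extract_matched_names_py csv_data)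

-- ===== LEMMAS AND PROOFS =====

-- in a strictly increasing list the last element is the maximum
theorem emn_last_max (acc : List String) (g : String) (h : acc.Pairwise (· < ·))
    (hg : acc.getLast? = some g) : ∀ x ∈ acc, x ≤ g := by
  induction acc with
  | nil => simp at hg
  | cons a t ih =>
    cases t with
    | nil =>
      simp at hg; subst hg; intro x hx; simp at hx; simp [hx]
    | cons b t' =>
      rw [List.getLast?_cons_cons] at hg
      intro x hx
      rcases List.mem_cons.mp hx with rfl | hx'
      · have hlt : x < b := (List.pairwise_cons.mp h).1 b (by simp)
        have := ih (List.pairwise_cons.mp h).2 hg b (by simp)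
        exact le_trans (le_of_lt hlt) this
      · exact ih (List.pairwise_cons.mp h).2 hg x hx'

-- invariant of the squeeze fold: on a sorted input it builds a strictly increasing list
-- whose members are exactly the nonempty members of the input (plus the accumulator)
theorem emn_squeeze_go (l : List String) (acc : List String)
    (hl : l.Pairwise (· ≤ ·)) (hacc : acc.Pairwise (· < ·))
    (hle : ∀ a ∈ acc, ∀ x ∈ l, a ≤ x) :
    (l.foldl (fun out name =>
        if name ≠ "" ∧ (out = [] ∨ out.getLast? ≠ some name) then out ++ [name] else out) acc).Pairwise (· < ·)
    ∧ ∀ y, (y ∈ l.foldl (fun out name =>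
        if name ≠ "" ∧ (out = [] ∨ out.getLast? ≠ some name) then out ++ [name] else out) acc
        ↔ y ∈ acc ∨ (y ∈ l ∧ y ≠ "")) := by
  induction l generalizing acc with
  | nil => simpa using hacc
  | cons x t ih =>
    have hx : ∀ b ∈ t, x ≤ b := (List.pairwise_cons.mp hl).1
    have ht : t.Pairwise (· ≤ ·) := (List.pairwise_cons.mp hl).2
    simp only [List.foldl_cons]
    by_cases hc : x ≠ "" ∧ (acc = [] ∨ acc.getLast? ≠ some x)
    · rw [if_pos hc]
      have hlt : ∀ a ∈ acc, a < x := by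
        intro a ha
        have hax : a ≤ x := hle a ha x (by simp)
        rcases lt_or_eq_of_le hax with h' | rfl
        · exact h'
        · exfalso
          rcases hc.2 with hnil | hlast
          · simp [hnil] at ha
          · have hne : acc ≠ [] := by intro h0; simp [h0] at ha
            obtain ⟨g, hg⟩ := Option.isSome_iff_exists.mp (List.getLast?_isSome.mpr hne)
            have h1 : a ≤ g := emn_last_max acc g hacc hg a ha
            have h2 : g ≤ a := hle g (List.mem_of_getLast? hg) a (by simp)
            exact hlast (by rw [hg]; congr 1; exact le_antisymm h2 h1)
      have hacc' : (acc ++ [x]).Pairwise (· < ·) := by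
        rw [List.pairwise_append]
        exact ⟨hacc, by simp, by intro a ha b hb; simp at hb; subst hb; exact hlt a ha⟩
      have hle' : ∀ a ∈ acc ++ [x], ∀ x' ∈ t, a ≤ x' := by
        intro a ha x' hx'
        rcases List.mem_append.mp ha with ha' | ha'
        · exact hle a ha' x' (by simp [hx'])
        · simp at ha'; subst ha'; exact hx x' hx'
      obtain ⟨h1, h2⟩ := ih (acc ++ [x]) ht hacc' hle'
      refine ⟨h1, fun y => ?_⟩
      rw [h2 y]
      constructor
      · rintro (hy | ⟨hy, hne⟩)
        · rcases List.mem_append.mp hy with hy' | hy'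
          · exact Or.inl hy'
          · simp at hy'; subst hy'; exact Or.inr ⟨by simp, hc.1⟩
        · exact Or.inr ⟨by simp [hy], hne⟩
      · rintro (hy | ⟨hy, hne⟩)
        · exact Or.inl (List.mem_append.mpr (Or.inl hy))
        · rcases List.mem_cons.mp hy with rfl | hy'
          · exact Or.inl (by simp)
          · exact Or.inr ⟨hy', hne⟩
    · rw [if_neg hc]
      have hle' : ∀ a ∈ acc, ∀ x' ∈ t, a ≤ x' := fun a ha x' hx' => hle a ha x' (by simp [hx'])
      obtain ⟨h1, h2⟩ := ih acc ht hacc hle'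
      refine ⟨h1, fun y => ?_⟩
      rw [h2 y]
      constructor
      · rintro (hy | ⟨hy, hne⟩)
        · exact Or.inl hy
        · exact Or.inr ⟨by simp [hy], hne⟩
      · rintro (hy | ⟨hy, hne⟩)
        · exact Or.inl hy
        · rcases List.mem_cons.mp hy with rfl | hy'
          · -- the test was false yet y ≠ "": so acc.getLast? = some y, hence y ∈ acc
            push Not at hc
            exact Or.inl (List.mem_of_getLast? (hc hne).2)
          · exact Or.inr ⟨hy', hne⟩

-- a loop filling the two sets from one row list is a pair of Set.update's
theorem emn_pairfold {β : Type} (l : List β) (f g : β → String)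
    (a b : PySem.Set String) :
    l.foldl (fun (st : PySem.Set String × PySem.Set String) r =>
        (PySem.Set.add st.1 (f r), PySem.Set.add st.2 (g r))) (a, b)
      = (PySem.Set.update a (l.map f), PySem.Set.update b (l.map g)) := by
  rw [PySem.List.foldl_prod_mk (f := fun s r => PySem.Set.add s (f r))
      (g := fun s r => PySem.Set.add s (g r))]
  simp [PySem.Set.update, List.foldl_map]

-- a chain of four updates of the empty set has no duplicates
theorem emn_nodup4 (a b c d : List String) :
    ((((((PySem.Set.empty : PySem.Set String)).update a).update b).update c).update d).Nodup := by
  apply PySem.Set.nodup_update; apply PySem.Set.nodup_update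
  apply PySem.Set.nodup_update; apply PySem.Set.nodup_update
  exact List.nodup_nil

-- per component: sorted(discard S "") equals squeeze(sorted xs) when S holds exactly xs's elements
theorem emn_component (xs : List String) (S : PySem.Set String)
    (hnd : S.Nodup) (hmem : ∀ y, y ∈ S ↔ y ∈ xs) :
    PySem.List.sorted (PySem.Set.discard S "") (fun x => x) false
      = emnSqueeze (PySem.List.sorted xs (fun x => x) false) := by
  unfold emnSqueeze
  have hl : (PySem.List.sorted xs (fun x => x) false).Pairwise (· ≤ ·) :=
    PySem.List.sorted_pairwise xs (fun x => x)
  obtain ⟨hpw, hm⟩ := emn_squeeze_go (PySem.List.sorted xs (fun x => x) false) []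
    hl (by simp) (by simp)
  apply PySem.List.sorted_eq_of_perm_of_pairwise_lt
  · rw [List.perm_ext_iff_of_nodup (hpw.imp (fun h => ne_of_lt h))
      (PySem.Set.nodup_discard S "" hnd)]
    intro y
    rw [hm y]
    simp [PySem.Set.mem_discard, hmem y, PySem.List.mem_sorted]
  · exact hpw

-- ===== VERDICT =====
theorem extract_matched_names_py_spec : Claim_equal_extract_matched_names_py := by
  intro csv_data _
  unfold Spec_extract_matched_names_py extract_matched_names_py extract_matched_names_py_alt
  simp only [emn_pairfold]
  refine Prod.ext ?_ ?_ <;> simp only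
  · -- clients component
    refine emn_component _ _ (emn_nodup4 _ _ _ _) ?_
    intro y
    simp only [emnFields, PySem.Set.mem_update, List.flatMap_cons, List.flatMap_nil,
      List.append_nil, List.mem_append, PySem.Set.empty, List.mem_nil_iff]
    tauto
  · -- registrants component
    refine emn_component _ _ (emn_nodup4 _ _ _ _) ?_
    intro y
    simp only [emnFields, PySem.Set.mem_update, List.flatMap_cons, List.flatMap_nil,
      List.append_nil, List.mem_append, PySem.Set.empty, List.mem_nil_iff]
    tauto
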